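-- pv_equiv track=rewrite | github.com/IgrMd/yandex-algos-training | Тренировки по алгоритмам 1.0/Лекция 2. «Линейный поиск»/H.py | max_factors3
-- ===== SOURCE A (Python) =====
-- def max_factors3(sequence):
--     if len(sequence) == 3:
--         return sequence
--     max1 = sequence[0]
--     max2 = sequence[1]
--     max3 = sequence[2]
--     if max3 > max2:
--         max3, max2 = max2, max3
--     if max2 > max1:
--         max2, max1 = max1, max2
--     if max3 > max2:
--         max3, max2 = max2, max3
--
--     min1 = min(sequence[0], sequence[1])
--     min2 = max(sequence[0], sequence[1])
--
--     for i in range(2, len(sequence)):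
--         elem = sequence[i]
--         if i > 2:
--             if elem > max1:
--                 max3 = max2
--                 max2 = max1
--                 max1 = elem
--             elif elem > max2:
--                 max3 = max2
--                 max2 = elem
--             elif elem > max3:
--                 max3 = elem
--         if elem < min1:
--             min2 = min1
--             min1 = elem
--         elif elem < min2:
--             min2 = elem
--     if max1 * max2 * max3 >= min1 * min2 * max1:
--         return max1, max2, max3
--     else:
--         return min1, min2, max1
-- ===== SOURCE B (Python) =====
-- def max_factors3(sequence):
--     if len(sequence) == 3:
--         return sequence
--     s = sorted(sequence)
--     if s[-1] * s[-2] * s[-3] >= s[0] * s[1] * s[-1]: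
--         return s[-1], s[-2], s[-3]
--     else:
--         return s[0], s[1], s[-1]
-- ===== Notes on version B (the rewrite author's own statement) =====
-- stated objective: simpler
-- what changed: Replaces the hand-rolled running top-3/bottom-2 scan (swap network plus an indexed loop with an i>2 guard) by sort-then-index: sort the sequence once and compare s[-1]*s[-2]*s[-3] with s[0]*s[1]*s[-1], keeping A's len==3 early return.
import Mathlib
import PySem

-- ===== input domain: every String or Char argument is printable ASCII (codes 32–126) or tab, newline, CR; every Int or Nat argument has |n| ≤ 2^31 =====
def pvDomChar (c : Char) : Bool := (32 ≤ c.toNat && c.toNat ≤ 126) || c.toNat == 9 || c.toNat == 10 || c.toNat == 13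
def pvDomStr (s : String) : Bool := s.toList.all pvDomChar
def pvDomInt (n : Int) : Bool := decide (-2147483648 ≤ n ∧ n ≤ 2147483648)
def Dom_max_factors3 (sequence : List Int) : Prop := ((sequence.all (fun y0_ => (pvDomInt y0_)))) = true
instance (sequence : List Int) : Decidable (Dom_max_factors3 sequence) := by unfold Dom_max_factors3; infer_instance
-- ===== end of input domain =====

-- B replaces A's running top-3/bottom-2 scan by sort-then-index (same results; simpler, not faster).

-- ===== PORT A =====
-- the body of A's `elif` chain updating max1..max3 (only run when i > 2)
def pvTopStep (t : Int × Int × Int) (e : Int) : Int × Int × Int :=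
  if e > t.1 then (e, t.1, t.2.1)
  else if e > t.2.1 then (t.1, e, t.2.1)
  else if e > t.2.2 then (t.1, t.2.1, e)
  else t

-- the body of A's `if/elif` updating min1, min2
def pvBotStep (b : Int × Int) (e : Int) : Int × Int :=
  if e < b.1 then (e, b.1)
  else if e < b.2 then (b.1, e)
  else b

-- one iteration of A's `for i in range(2, len(sequence))` loop
def pvAStep (sequence : List Int) (st : (Int × Int × Int) × (Int × Int)) (i : Int) :
    (Int × Int × Int) × (Int × Int) :=
  let elem := PySem.List.pyGetD sequence i 0
  (if i > 2 then pvTopStep st.1 elem else st.1, pvBotStep st.2 elem)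

-- A's three conditional swaps (tuple assignments) ordering max1, max2, max3
def pvInitMax (max1 max2 max3 : Int) : Int × Int × Int :=
  let p1 := if max3 > max2 then (max2, max3) else (max3, max2)
  let p2 := if p1.2 > max1 then (max1, p1.2) else (p1.2, max1)
  let p3 := if p1.1 > p2.1 then (p2.1, p1.1) else (p1.1, p2.1)
  (p2.2, p3.2, p3.1)

def max_factors3 (sequence : List Int) : Int × Int × Int :=
  if PySem.List.len sequence = 3 then
    (PySem.List.pyGetD sequence 0 0, PySem.List.pyGetD sequence 1 0, PySem.List.pyGetD sequence 2 0)
  else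
    let max1 := PySem.List.pyGetD sequence 0 0
    let max2 := PySem.List.pyGetD sequence 1 0
    let max3 := PySem.List.pyGetD sequence 2 0
    let min1 := min (PySem.List.pyGetD sequence 0 0) (PySem.List.pyGetD sequence 1 0)
    let min2 := max (PySem.List.pyGetD sequence 0 0) (PySem.List.pyGetD sequence 1 0)
    let st := (PySem.List.pyRange 2 (PySem.List.len sequence) 1).foldl (pvAStep sequence)
                (pvInitMax max1 max2 max3, (min1, min2))
    if st.1.1 * st.1.2.1 * st.1.2.2 ≥ st.2.1 * st.2.2 * st.1.1 then st.1
    else (st.2.1, st.2.2, st.1.1)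

-- ===== PORT B =====
def max_factors3_alt (sequence : List Int) : Int × Int × Int :=
  if PySem.List.len sequence = 3 then
    (PySem.List.pyGetD sequence 0 0, PySem.List.pyGetD sequence 1 0, PySem.List.pyGetD sequence 2 0)
  else
    let s := PySem.List.sorted sequence (fun x => x) false
    if PySem.List.pyGetD s (-1) 0 * PySem.List.pyGetD s (-2) 0 * PySem.List.pyGetD s (-3) 0 ≥
        PySem.List.pyGetD s 0 0 * PySem.List.pyGetD s 1 0 * PySem.List.pyGetD s (-1) 0 then
      (PySem.List.pyGetD s (-1) 0, PySem.List.pyGetD s (-2) 0, PySem.List.pyGetD s (-3) 0)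
    else
      (PySem.List.pyGetD s 0 0, PySem.List.pyGetD s 1 0, PySem.List.pyGetD s (-1) 0)

-- ===== PRECONDITION & SPEC =====
-- Pre_ excludes sequences of fewer than 3 elements, on which A raises IndexError.
def Pre_max_factors3 (sequence : List Int) : Prop := 3 ≤ sequence.length
instance (sequence : List Int) : Decidable (Pre_max_factors3 sequence) := by
  unfold Pre_max_factors3; infer_instance
def pvWitness_max_factors3 : List Int := [1, 2, 3, 4]
def Spec_max_factors3 (sequence : List Int) (out : Int × Int × Int) : Prop := out = max_factors3_alt sequence
instance (sequence : List Int) (out : Int × Int × Int) : Decidable (Spec_max_factors3 sequence out) := by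
  unfold Spec_max_factors3; infer_instance

-- ===== CLAIM (what is proved, stated in full; the proofs are below) =====
def Claim_equal_max_factors3 : Prop := ∀ (sequence : List Int), Dom_max_factors3 sequence → Pre_max_factors3 sequence → Spec_max_factors3 sequence (max_factors3 sequence)

-- ===== LEMMAS AND PROOFS =====

-- invariant of the running top-3: the fold state is the (descending) three largest seen so far
theorem pv_top_inv (l : List Int) : ∀ (r : List Int) (t1 t2 t3 : Int),
    (∀ x ∈ r, x ≤ t3) → t3 ≤ t2 → t2 ≤ t1 →
    ∃ r' : List Int,
      ((r ++ [t3, t2, t1]) ++ l).Perm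
        (r' ++ [(l.foldl pvTopStep (t1, t2, t3)).2.2, (l.foldl pvTopStep (t1, t2, t3)).2.1,
                (l.foldl pvTopStep (t1, t2, t3)).1]) ∧
      (∀ x ∈ r', x ≤ (l.foldl pvTopStep (t1, t2, t3)).2.2) ∧
      (l.foldl pvTopStep (t1, t2, t3)).2.2 ≤ (l.foldl pvTopStep (t1, t2, t3)).2.1 ∧
      (l.foldl pvTopStep (t1, t2, t3)).2.1 ≤ (l.foldl pvTopStep (t1, t2, t3)).1 := by
  induction l with
  | nil =>
    intro r t1 t2 t3 hr h32 h21
    exact ⟨r, by simp, hr, h32, h21⟩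
  | cons e l ih =>
    intro r t1 t2 t3 hr h32 h21
    simp only [List.foldl_cons]
    have hperm : ∀ (r2 : List Int) (u1 u2 u3 : Int),
        ((r2 ++ [u3, u2, u1]).Perm ((r ++ [t3, t2, t1]) ++ [e])) →
        (∀ x ∈ r2, x ≤ u3) → u3 ≤ u2 → u2 ≤ u1 →
        (pvTopStep (t1, t2, t3) e) = (u1, u2, u3) →
        ∃ r' : List Int,
          ((r ++ [t3, t2, t1]) ++ (e :: l)).Perm
            (r' ++ [(l.foldl pvTopStep (pvTopStep (t1, t2, t3) e)).2.2,
                    (l.foldl pvTopStep (pvTopStep (t1, t2, t3) e)).2.1,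
                    (l.foldl pvTopStep (pvTopStep (t1, t2, t3) e)).1]) ∧
          (∀ x ∈ r', x ≤ (l.foldl pvTopStep (pvTopStep (t1, t2, t3) e)).2.2) ∧
          (l.foldl pvTopStep (pvTopStep (t1, t2, t3) e)).2.2 ≤ (l.foldl pvTopStep (pvTopStep (t1, t2, t3) e)).2.1 ∧
          (l.foldl pvTopStep (pvTopStep (t1, t2, t3) e)).2.1 ≤ (l.foldl pvTopStep (pvTopStep (t1, t2, t3) e)).1 := by
      intro r2 u1 u2 u3 hp hr2 h32' h21' hstep
      rw [hstep]
      obtain ⟨r', hperm', hb', h1', h2'⟩ := ih r2 u1 u2 u3 hr2 h32' h21'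
      refine ⟨r', ?_, hb', h1', h2'⟩
      refine List.Perm.trans ?_ hperm'
      have h := (hp.symm).append_right l
      simpa using h
    by_cases h1 : e > t1
    · exact hperm (r ++ [t3]) e t1 t2
        (by simp)
        (by intro x hx; rcases List.mem_append.mp hx with h | h
            · exact le_trans (hr x h) h32
            · simp at h; omega)
        (by omega) (by omega) (by simp [pvTopStep, h1])
    · by_cases h2 : e > t2
      · exact hperm (r ++ [t3]) t1 e t2
          (by simp [List.perm_iff_count, List.count_append, List.count_cons]; (try (intro a; omega)))
          (by intro x hx; rcases List.mem_append.mp hx with h | h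
              · exact le_trans (hr x h) h32
              · simp at h; omega)
          (by omega) (by omega) (by simp [pvTopStep, h1, h2])
      · by_cases h3 : e > t3
        · exact hperm (r ++ [t3]) t1 t2 e
            (by simp [List.perm_iff_count, List.count_append, List.count_cons]; (try (intro a; omega)))
            (by intro x hx; rcases List.mem_append.mp hx with h | h
                · exact le_trans (hr x h) (by omega)
                · simp at h; omega)
            (by omega) (by omega) (by simp [pvTopStep, h1, h2, h3])
        · exact hperm (r ++ [e]) t1 t2 t3
            (by simp [List.perm_iff_count, List.count_append, List.count_cons]; (try (intro a; omega)))
            (by intro x hx; rcases List.mem_append.mp hx with h | h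
                · exact hr x h
                · simp at h; omega)
            h32 h21 (by simp [pvTopStep, h1, h2, h3])

-- invariant of the running bottom-2
theorem pv_bot_inv (l : List Int) : ∀ (q : List Int) (b1 b2 : Int),
    (∀ x ∈ q, b2 ≤ x) → b1 ≤ b2 →
    ∃ q' : List Int,
      (([b1, b2] ++ q) ++ l).Perm
        ((l.foldl pvBotStep (b1, b2)).1 :: (l.foldl pvBotStep (b1, b2)).2 :: q') ∧
      (∀ x ∈ q', (l.foldl pvBotStep (b1, b2)).2 ≤ x) ∧
      (l.foldl pvBotStep (b1, b2)).1 ≤ (l.foldl pvBotStep (b1, b2)).2 := by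
  induction l with
  | nil =>
    intro q b1 b2 hq h12
    exact ⟨q, by simp, hq, h12⟩
  | cons e l ih =>
    intro q b1 b2 hq h12
    simp only [List.foldl_cons]
    have hstep : ∀ (q2 : List Int) (v1 v2 : Int),
        ((([v1, v2] ++ q2)).Perm (([b1, b2] ++ q) ++ [e])) →
        (∀ x ∈ q2, v2 ≤ x) → v1 ≤ v2 →
        (pvBotStep (b1, b2) e) = (v1, v2) →
        ∃ q' : List Int,
          (([b1, b2] ++ q) ++ (e :: l)).Perm
            ((l.foldl pvBotStep (pvBotStep (b1, b2) e)).1 ::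
             (l.foldl pvBotStep (pvBotStep (b1, b2) e)).2 :: q') ∧
          (∀ x ∈ q', (l.foldl pvBotStep (pvBotStep (b1, b2) e)).2 ≤ x) ∧
          (l.foldl pvBotStep (pvBotStep (b1, b2) e)).1 ≤ (l.foldl pvBotStep (pvBotStep (b1, b2) e)).2 := by
      intro q2 v1 v2 hp hq2 h12' hstep
      rw [hstep]
      obtain ⟨q', hperm', hb', h1'⟩ := ih q2 v1 v2 hq2 h12'
      refine ⟨q', ?_, hb', h1'⟩
      refine List.Perm.trans ?_ hperm'
      have h := (hp.symm).append_right l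
      simpa using h
    by_cases h1 : e < b1
    · exact hstep (q ++ [b2]) e b1
        (by simp [List.perm_iff_count, List.count_append, List.count_cons]; (try (intro a; omega)))
        (by intro x hx; rcases List.mem_append.mp hx with h | h
            · exact le_trans h12 (hq x h)
            · simp at h; omega)
        (by omega) (by simp [pvBotStep, h1])
    · by_cases h2 : e < b2
      · exact hstep (q ++ [b2]) b1 e
          (by simp [List.perm_iff_count, List.count_append, List.count_cons]; (try (intro a; omega)))
          (by intro x hx; rcases List.mem_append.mp hx with h | h
              · exact le_trans (by omega) (hq x h)
              · simp at h; omega)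
          (by omega) (by simp [pvBotStep, h1, h2])
      · exact hstep (q ++ [e]) b1 b2
          (by simp)
          (by intro x hx; rcases List.mem_append.mp hx with h | h
              · exact hq x h
              · simp at h; omega)
          h12 (by simp [pvBotStep, h1, h2])

-- a sorted list decomposed from the back
theorem pvLast1 (sr : List Int) (T3 T2 T1 : Int) :
    PySem.List.pyGetD (sr ++ [T3, T2, T1]) (-1) 0 = T1 := by
  rw [PySem.List.pyGetD_neg_ofNat (sr ++ [T3,T2,T1]) 1 0 (by omega) (by simp)]
  rw [List.getElem_eq_iff]
  have h : (sr ++ [T3,T2,T1]).length - 1 = sr.length + 2 := by simp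
  rw [h, List.getElem?_append_right (by omega)]
  simp

theorem pvLast2 (sr : List Int) (T3 T2 T1 : Int) :
    PySem.List.pyGetD (sr ++ [T3, T2, T1]) (-2) 0 = T2 := by
  rw [PySem.List.pyGetD_neg_ofNat (sr ++ [T3,T2,T1]) 2 0 (by omega) (by simp)]
  rw [List.getElem_eq_iff]
  have h : (sr ++ [T3,T2,T1]).length - 2 = sr.length + 1 := by simp
  rw [h, List.getElem?_append_right (by omega)]
  simp

theorem pvLast3 (sr : List Int) (T3 T2 T1 : Int) :
    PySem.List.pyGetD (sr ++ [T3, T2, T1]) (-3) 0 = T3 := by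
  rw [PySem.List.pyGetD_neg_ofNat (sr ++ [T3,T2,T1]) 3 0 (by omega) (by simp)]
  rw [List.getElem_eq_iff]
  have h : (sr ++ [T3,T2,T1]).length - 3 = sr.length := by simp
  rw [h, List.getElem?_append_right (by omega)]
  simp

-- from the two invariants, read off B's five indexings of the sorted list
theorem pv_core (seq r' q' : List Int) (T1 T2 T3 B1 B2 : Int)
    (hpt : seq.Perm (r' ++ [T3, T2, T1])) (hrt : ∀ x ∈ r', x ≤ T3) (h32 : T3 ≤ T2) (h21 : T2 ≤ T1)
    (hpb : seq.Perm (B1 :: B2 :: q')) (hqb : ∀ x ∈ q', B2 ≤ x) (h12 : B1 ≤ B2) :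
    PySem.List.pyGetD (PySem.List.sorted seq (fun x => x) false) (-1) 0 = T1 ∧
    PySem.List.pyGetD (PySem.List.sorted seq (fun x => x) false) (-2) 0 = T2 ∧
    PySem.List.pyGetD (PySem.List.sorted seq (fun x => x) false) (-3) 0 = T3 ∧
    PySem.List.pyGetD (PySem.List.sorted seq (fun x => x) false) 0 0 = B1 ∧
    PySem.List.pyGetD (PySem.List.sorted seq (fun x => x) false) 1 0 = B2 := by
  have hs1 : PySem.List.sorted seq (fun x => x) false =
      PySem.List.sorted r' (fun x => x) false ++ [T3, T2, T1] := by
    apply PySem.List.sorted_id_eq_of_perm_of_pairwise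
    · exact ((PySem.List.sorted_perm r' (fun x => x) false).append_right _).trans hpt.symm
    · rw [List.pairwise_append]
      refine ⟨by simpa using PySem.List.sorted_pairwise (xs := r') (key := fun x => x), ?_, ?_⟩
      · simp [List.pairwise_cons]; omega
      · intro a ha b hb
        have ha' : a ∈ r' := (PySem.List.mem_sorted _ _ _ _).mp ha
        have := hrt a ha'
        simp at hb
        rcases hb with h | h | h <;> omega
  have hs2 : PySem.List.sorted seq (fun x => x) false =
      B1 :: B2 :: PySem.List.sorted q' (fun x => x) false := by
    apply PySem.List.sorted_id_eq_of_perm_of_pairwise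
    · exact (((PySem.List.sorted_perm q' (fun x => x) false).cons B2).cons B1).trans hpb.symm
    · rw [List.pairwise_cons]
      constructor
      · intro b hb
        rcases List.mem_cons.mp hb with h | h
        · omega
        · have := hqb b ((PySem.List.mem_sorted _ _ _ _).mp h); omega
      · rw [List.pairwise_cons]
        refine ⟨fun b hb => hqb b ((PySem.List.mem_sorted _ _ _ _).mp hb), ?_⟩
        simpa using PySem.List.sorted_pairwise (xs := q') (key := fun x => x)
  refine ⟨?_, ?_, ?_, ?_, ?_⟩
  · rw [hs1]; exact pvLast1 _ _ _ _
  · rw [hs1]; exact pvLast2 _ _ _ _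
  · rw [hs1]; exact pvLast3 _ _ _ _
  · rw [hs2]; simp [pysem]
  · rw [hs2]; simp [pysem]

-- A's indexed loop over range(2, n) is the pair of element folds
theorem pvA_fold (x0 x1 x2 : Int) (rest : List Int) (T0 : Int × Int × Int) (B0 : Int × Int) :
    (PySem.List.pyRange 2 (PySem.List.len (x0::x1::x2::rest)) 1).foldl
        (pvAStep (x0::x1::x2::rest)) (T0, B0)
    = (rest.foldl pvTopStep T0, (x2::rest).foldl pvBotStep B0) := by
  rw [PySem.List.pyRange_one_cons (by simp [PySem.List.len_eq]; omega)]
  rw [List.foldl_cons]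
  have hstep2 : pvAStep (x0::x1::x2::rest) (T0, B0) 2 = (T0, pvBotStep B0 x2) := by
    simp [pvAStep, pysem]
  rw [hstep2]
  have hfun : ∀ (acc : (Int × Int × Int) × (Int × Int)) (i : Int),
      i ∈ PySem.List.pyRange (2+1) (PySem.List.len (x0::x1::x2::rest)) 1 →
      pvAStep (x0::x1::x2::rest) acc i =
        (pvTopStep acc.1 (PySem.List.pyGetD (x0::x1::x2::rest) i 0),
         pvBotStep acc.2 (PySem.List.pyGetD (x0::x1::x2::rest) i 0)) := by
    intro acc i hi
    have h3i : (3:Int) ≤ i := by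
      have := (PySem.List.mem_pyRange_one.mp hi).1; omega
    simp [pvAStep, show i > 2 by omega]
  rw [PySem.List.foldl_congr_mem _ _ _ _ hfun]
  rw [PySem.List.foldl_prod_mk
    (fun t i => pvTopStep t (PySem.List.pyGetD (x0::x1::x2::rest) i 0))
    (fun b i => pvBotStep b (PySem.List.pyGetD (x0::x1::x2::rest) i 0))]
  rw [PySem.List.foldl_pyRange_pyGetD _ _ pvTopStep _ (by omega : (0:Int) ≤ 2+1),
      PySem.List.foldl_pyRange_pyGetD _ _ pvBotStep _ (by omega : (0:Int) ≤ 2+1)]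
  simp

-- the swap network sorts the first three elements descendingly
theorem pv_sort3 (a b c : Int) :
    [(pvInitMax a b c).2.2, (pvInitMax a b c).2.1, (pvInitMax a b c).1].Perm [a, b, c] ∧
    (pvInitMax a b c).2.2 ≤ (pvInitMax a b c).2.1 ∧ (pvInitMax a b c).2.1 ≤ (pvInitMax a b c).1 := by
  simp only [pvInitMax]
  split_ifs <;>
    refine ⟨by simp [List.perm_iff_count, List.count_cons]; (try (intro x; omega)), by omega, by omega⟩

-- the else branch of both ports agrees
theorem pv_else (x0 x1 x2 : Int) (rest : List Int)
    (h3 : ¬ PySem.List.len (x0::x1::x2::rest) = 3) :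
    max_factors3 (x0::x1::x2::rest) = max_factors3_alt (x0::x1::x2::rest) := by
  have hg0 : PySem.List.pyGetD (x0::x1::x2::rest) 0 0 = x0 := by simp [pysem]
  have hg1 : PySem.List.pyGetD (x0::x1::x2::rest) 1 0 = x1 := by simp [pysem]
  have hg2 : PySem.List.pyGetD (x0::x1::x2::rest) 2 0 = x2 := by simp [pysem]
  obtain ⟨hperm0, h32, h21⟩ := pv_sort3 x0 x1 x2
  obtain ⟨r', hpt, hrt, ht1, ht2⟩ :=
    pv_top_inv rest [] (pvInitMax x0 x1 x2).1 (pvInitMax x0 x1 x2).2.1 (pvInitMax x0 x1 x2).2.2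
      (by intro x hx; simp at hx) h32 h21
  obtain ⟨q', hpb, hqb, hb1⟩ :=
    pv_bot_inv (x2::rest) [] (min x0 x1) (max x0 x1)
      (by intro x hx; simp at hx) (min_le_max)
  have hptop : (x0::x1::x2::rest).Perm
      (r' ++ [(rest.foldl pvTopStep (pvInitMax x0 x1 x2)).2.2,
              (rest.foldl pvTopStep (pvInitMax x0 x1 x2)).2.1,
              (rest.foldl pvTopStep (pvInitMax x0 x1 x2)).1]) := by
    refine List.Perm.trans ?_ (by simpa using hpt)
    have h := hperm0.symm.append_right rest
    simpa using h
  have hpbot : (x0::x1::x2::rest).Perm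
      (((x2::rest).foldl pvBotStep (min x0 x1, max x0 x1)).1 ::
       ((x2::rest).foldl pvBotStep (min x0 x1, max x0 x1)).2 :: q') := by
    refine List.Perm.trans ?_ (by simpa using hpb)
    rcases le_total x0 x1 with h | h
    · simp [min_eq_left h, max_eq_right h]
    · simp [min_eq_right h, max_eq_left h]
      exact List.Perm.swap x1 x0 (x2::rest)
  obtain ⟨e1, e2, e3, e4, e5⟩ :=
    pv_core (x0::x1::x2::rest) r' q' _ _ _ _ _ hptop hrt ht1 ht2 hpbot hqb hb1
  simp only [max_factors3, max_factors3_alt, if_neg h3, hg0, hg1, hg2]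
  rw [pvA_fold, e1, e2, e3, e4, e5]

-- ===== VERDICT (by name: the statement is the Claim_ definition above) =====
theorem max_factors3_spec : Claim_equal_max_factors3 := by
  intro sequence _hdom hpre
  unfold Pre_max_factors3 at hpre
  unfold Spec_max_factors3
  by_cases h3 : PySem.List.len sequence = 3
  · have h3' : (sequence.length : Int) = 3 := by simpa [PySem.List.len_eq] using h3
    simp [max_factors3, max_factors3_alt, PySem.List.len_eq, h3']
  · match sequence, hpre with
    | x0::x1::x2::rest, _ => exact pv_else x0 x1 x2 rest h3
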